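-- pv_equiv track=rewrite | github.com/sam3oh5/Algorithmic_Problem_Solving_Strategies | 17장/17.3 크리스마스 인형.py | solution_by_myself_2
-- ===== SOURCE A (Python) =====
-- def solution_by_myself_2(boxes, k):
--     if len(boxes) == 0:
--         return 0
--     premain = [0, boxes[0] % k]
--     for idx, box in enumerate(boxes[1:], 1):
--         value = (premain[idx] + box) % k
--         premain.append(value)
--     length = len(premain) - 2
--     while length >= 0:
--         if premain[-1] == premain[length]:
--             break
--         length -= 1
--     if length < 0:
--         if premain:
--             return 0
--         else:
--             return 1
--     else:
--         return max(1 + solution_by_myself_2(boxes[:length], k), solution_by_myself_2(boxes[:-1], k))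
-- ===== SOURCE B (Python) =====
-- def solution_by_myself_2(boxes, k):
--     # Bottom-up DP over prefix lengths with a last-occurrence-of-remainder dict.
--     last = {0: 0}
--     r = 0
--     dp = [0]
--     for m, box in enumerate(boxes, 1):
--         r = (r + box) % k
--         j = last.get(r)
--         if j is None:
--             dp.append(0)
--         else:
--             dp.append(max(1 + dp[j], dp[m - 1]))
--         last[r] = m
--     return dp[-1]
-- ===== Notes on version B (the rewrite author's own statement) =====
-- stated objective: alternative
-- what changed: Replaced A's recursion over list slices (rebuilding prefix-remainder tables and re-solving overlapping subproblems) by a single bottom-up DP pass over prefix lengths with a dict mapping each remainder to its last occurrence index.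
import Mathlib
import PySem

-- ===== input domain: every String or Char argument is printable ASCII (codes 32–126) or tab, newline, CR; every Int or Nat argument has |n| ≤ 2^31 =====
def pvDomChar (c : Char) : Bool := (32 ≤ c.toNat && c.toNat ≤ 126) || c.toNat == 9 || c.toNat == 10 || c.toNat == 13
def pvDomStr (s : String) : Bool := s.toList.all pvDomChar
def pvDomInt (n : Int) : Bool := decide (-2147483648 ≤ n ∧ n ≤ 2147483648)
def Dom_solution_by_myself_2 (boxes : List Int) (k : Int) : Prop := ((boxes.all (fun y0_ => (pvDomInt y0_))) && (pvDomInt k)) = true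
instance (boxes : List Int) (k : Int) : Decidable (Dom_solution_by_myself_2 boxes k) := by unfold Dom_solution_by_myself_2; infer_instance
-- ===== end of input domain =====

-- B replaces A's recursion over list slices by a single bottom-up DP pass with a last-remainder-index dict; return values are identical (Pre_ only excludes k = 0 with nonempty boxes, where both Pythons raise ZeroDivisionError).


-- ===== PORT A =====
-- the 'while length >= 0: if premain[-1] == premain[length]: break; length -= 1' loop
-- (premain[-1] / premain[length] are always in range here; pyGetD is exact for them)
def pvFindLen (premain : List Int) (length : Int) : Int :=
  if 0 ≤ length then
    if PySem.List.pyGetD premain (-1) 0 = PySem.List.pyGetD premain length 0 then length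
    else pvFindLen premain (length - 1)
  else length
termination_by (length + 1).toNat
decreasing_by omega

theorem pvFindLen_le (premain : List Int) (length : Int) : pvFindLen premain length ≤ length := by
  unfold pvFindLen
  split
  · split
    · exact le_refl _
    · have := pvFindLen_le premain (length - 1)
      omega
  · exact le_refl _
termination_by (length + 1).toNat
decreasing_by omega

-- the body of 'for idx, box in enumerate(boxes[1:], 1)': state = (idx, premain)
def pvStepA (k : Int) (st : Int × List Int) (box : Int) : Int × List Int :=
  (st.1 + 1, st.2 ++ [PySem.Int.mod (PySem.List.pyGetD st.2 st.1 0 + box) k])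

theorem pvStepA_len (l : List Int) (k : Int) (st : Int × List Int) :
    ((l.foldl (pvStepA k) st).2).length = st.2.length + l.length := by
  induction l generalizing st with
  | nil => simp
  | cons b bs ih => simp [List.foldl_cons, ih, pvStepA]; omega

def solution_by_myself_2 (boxes : List Int) (k : Int) : Int :=
  if boxes.length = 0 then 0
  else
    let premain := ((boxes.drop 1).foldl (pvStepA k)
        (1, [0, PySem.Int.mod (PySem.List.pyGetD boxes 0 0) k])).2
    let length := pvFindLen premain ((premain.length : Int) - 2)
    if _h : length < 0 then
      if premain ≠ [] then 0 else 1
    else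
      max (1 + solution_by_myself_2 (PySem.List.slice boxes none (some length)) k)
          (solution_by_myself_2 (PySem.List.slice boxes none (some (-1))) k)
termination_by boxes.length
decreasing_by
  · have hle : length ≤ (premain.length : Int) - 2 := pvFindLen_le _ _
    have hlen : premain.length = 2 + (boxes.drop 1).length :=
      pvStepA_len (boxes.drop 1) k (1, [0, PySem.Int.mod (PySem.List.pyGetD boxes 0 0) k])
    have hdrop : (boxes.drop 1).length = boxes.length - 1 := by simp
    obtain ⟨n, hn⟩ : ∃ n : Nat, length = (n : Int) := ⟨length.toNat, by omega⟩
    change (PySem.List.slice boxes none (some length)).length < boxes.length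
    rw [hn, PySem.List.slice_to_natCast]
    simp only [List.length_take]
    omega
  · rw [PySem.List.slice_to_neg_one]
    simp only [List.length_dropLast]
    omega

-- ===== PORT B =====
-- the body of 'for m, box in enumerate(boxes, 1)': state = (m, r, dp, last)
def pvStepB (k : Int) (st : Int × Int × List Int × PySem.Dict Int Int) (box : Int) :
    Int × Int × List Int × PySem.Dict Int Int :=
  let m := st.1 + 1
  let r := PySem.Int.mod (st.2.1 + box) k
  let dp := st.2.2.1
  let last := st.2.2.2
  let dp' := match last.get? r with
    | none => dp ++ [0]
    | some j => dp ++ [max (1 + PySem.List.pyGetD dp j 0) (PySem.List.pyGetD dp (m - 1) 0)]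
  (m, r, dp', last.insert r m)

def solution_by_myself_2_alt (boxes : List Int) (k : Int) : Int :=
  let st := boxes.foldl (pvStepB k) (0, 0, [0], PySem.Dict.ofList [(0, 0)])
  PySem.List.pyGetD st.2.2.1 (-1) 0

-- ===== PRECONDITION & SPEC =====
-- Pre_ excludes exactly k = 0 with nonempty boxes: there Python's '%' raises ZeroDivisionError (in both A and B).
def Pre_solution_by_myself_2 (boxes : List Int) (k : Int) : Prop := boxes = [] ∨ k ≠ 0
instance (boxes : List Int) (k : Int) : Decidable (Pre_solution_by_myself_2 boxes k) := by unfold Pre_solution_by_myself_2; infer_instance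

def pvWitness_solution_by_myself_2 : List Int × Int := ([3, 1, 2], 2)

def Spec_solution_by_myself_2 (boxes : List Int) (k : Int) (out : Int) : Prop := out = solution_by_myself_2_alt boxes k
instance (boxes : List Int) (k : Int) (out : Int) : Decidable (Spec_solution_by_myself_2 boxes k out) := by unfold Spec_solution_by_myself_2; infer_instance

-- ===== CLAIM (what is proved, stated in full; the proofs are below) =====
def Claim_equal_solution_by_myself_2 : Prop := ∀ (boxes : List Int) (k : Int), Dom_solution_by_myself_2 boxes k → Pre_solution_by_myself_2 boxes k → Spec_solution_by_myself_2 boxes k (solution_by_myself_2 boxes k)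

-- ===== LEMMAS AND PROOFS =====

-- prefix remainders: pvRs boxes k = [0, sum(boxes[:1])%k, …, sum(boxes)%k]
def pvRem (k : Int) : List Int → Int → List Int
  | [], _ => []
  | b :: bs, r => PySem.Int.mod (r + b) k :: pvRem k bs (PySem.Int.mod (r + b) k)

def pvRs (boxes : List Int) (k : Int) : List Int := 0 :: pvRem k boxes 0

-- last index j < m with rs[j] = t (searching downward), as both programs do
def pvLook (rs : List Int) (t : Int) : Nat → Option Nat
  | 0 => none
  | j + 1 => if rs.getD j 0 = t then some j else pvLook rs t j

theorem pvLook_lt {rs : List Int} {t : Int} : ∀ {m j : Nat}, pvLook rs t m = some j → j < m := by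
  intro m
  induction m with
  | zero => intro j h; simp [pvLook] at h
  | succ n ih =>
    intro j h
    unfold pvLook at h
    split at h
    · simp at h; omega
    · exact Nat.lt_succ_of_lt (ih h)

-- the common value: what A computes on each prefix length
def pvG (rs : List Int) : Nat → Int
  | 0 => 0
  | m + 1 =>
    match h : pvLook rs (rs.getD (m + 1) 0) (m + 1) with
    | none => 0
    | some j => max (1 + pvG rs j) (pvG rs m)
termination_by m => m
decreasing_by
  · exact pvLook_lt h
  · exact Nat.lt_succ_self m

theorem pvG_zero (rs : List Int) : pvG rs 0 = 0 := by rw [pvG]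

theorem pvG_succ_none (rs : List Int) (m : Nat)
    (h : pvLook rs (rs.getD (m + 1) 0) (m + 1) = none) : pvG rs (m + 1) = 0 := by
  rw [pvG]; split <;> simp_all

theorem pvG_succ_some (rs : List Int) (m : Nat) (j : Nat)
    (h : pvLook rs (rs.getD (m + 1) 0) (m + 1) = some j) :
    pvG rs (m + 1) = max (1 + pvG rs j) (pvG rs m) := by
  rw [pvG]; split <;> simp_all

theorem pvRem_length (k : Int) (l : List Int) : ∀ r, (pvRem k l r).length = l.length := by
  induction l with
  | nil => intro r; rfl
  | cons b bs ih => intro r; simp [pvRem, ih]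

theorem pvRs_length (boxes : List Int) (k : Int) : (pvRs boxes k).length = boxes.length + 1 := by
  simp [pvRs, pvRem_length]

-- A's fold builds the prefix-remainder list
theorem foldA_eq (k : Int) (l : List Int) : ∀ (pre : List Int) (r : Int), pre.getLast? = some r →
    (l.foldl (pvStepA k) (((pre.length : Int) - 1), pre)).2 = pre ++ pvRem k l r := by
  induction l with
  | nil => intro pre r _; simp [pvRem]
  | cons b bs ih =>
    intro pre r hlast
    have hne : pre ≠ [] := by intro h; rw [h] at hlast; simp at hlast
    have hget : PySem.List.pyGetD pre ((pre.length : Int) - 1) 0 = r := by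
      have hlen : 0 < pre.length := List.length_pos_iff.mpr hne
      rw [PySem.List.pyGetD_eq_getElem pre 0 (by omega) (by omega)]
      have h3 : ((pre.length : Int) - 1).toNat = pre.length - 1 := by omega
      have h4 := List.getLast?_eq_getElem? (l := pre)
      rw [hlast] at h4
      have h5 : pre[((pre.length : Int) - 1).toNat]? = some r := by rw [h3]; exact h4.symm
      rw [List.getElem?_eq_getElem (by omega)] at h5
      exact Option.some.inj h5
    simp only [List.foldl_cons, pvStepA, hget]
    have hstep : ((pre.length : Int) - 1) + 1 = (((pre ++ [PySem.Int.mod (r + b) k]).length : Int) - 1) := by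
      simp
    rw [hstep, ih (pre ++ [PySem.Int.mod (r + b) k]) (PySem.Int.mod (r + b) k) (by simp)]
    simp [pvRem]

theorem premain_eq (boxes : List Int) (k : Int) (h : boxes ≠ []) :
    ((boxes.drop 1).foldl (pvStepA k) (1, [0, PySem.Int.mod (PySem.List.pyGetD boxes 0 0) k])).2
      = pvRs boxes k := by
  obtain ⟨b, bs, rfl⟩ : ∃ b bs, boxes = b :: bs := by
    cases boxes with
    | nil => exact absurd rfl h
    | cons b bs => exact ⟨b, bs, rfl⟩
  have h0 : PySem.List.pyGetD (b :: bs) 0 0 = b := PySem.List.pyGetD_zero_cons _ _ _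
  rw [h0]
  have h1 : ((1 : Int), ([0, PySem.Int.mod b k] : List Int))
      = ((((([0, PySem.Int.mod b k] : List Int)).length : Int) - 1), [0, PySem.Int.mod b k]) := by
    norm_num
  rw [List.drop_one, List.tail_cons, h1,
    foldA_eq k bs [0, PySem.Int.mod b k] (PySem.Int.mod b k) (by simp)]
  simp [pvRs, pvRem]

-- A's downward while-loop is pvLook
theorem findLen_eq (p : List Int) : ∀ (m : Nat),
    pvFindLen p ((m : Int) - 1)
      = (pvLook p (PySem.List.pyGetD p (-1) 0) m).elim (-1) (fun j => (j : Int)) := by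
  intro m
  induction m with
  | zero => rw [pvFindLen]; simp [pvLook]
  | succ n ih =>
    rw [pvFindLen]
    have hc : ((n + 1 : Nat) : Int) - 1 = (n : Int) := by push_cast; ring
    rw [hc]
    rw [if_pos (Int.natCast_nonneg n), PySem.List.pyGetD_natCast]
    unfold pvLook
    by_cases he : p.getD n 0 = PySem.List.pyGetD p (-1) 0
    · rw [if_pos he.symm, if_pos he]; rfl
    · rw [if_neg (fun hh => he hh.symm), if_neg he]
      exact ih

theorem pvLook_take (rs : List Int) (t : Int) : ∀ (m T : Nat), m ≤ T →
    pvLook (rs.take T) t m = pvLook rs t m := by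
  intro m
  induction m with
  | zero => intro T _; rfl
  | succ n ih =>
    intro T h
    unfold pvLook
    have hg : (rs.take T).getD n 0 = rs.getD n 0 := by
      rw [List.getD_eq_getElem?_getD, List.getD_eq_getElem?_getD, List.getElem?_take_of_lt (by omega)]
    rw [hg, ih T (by omega)]

theorem pvG_take (rs : List Int) : ∀ (m T : Nat), m < T → pvG (rs.take T) m = pvG rs m := by
  intro m
  induction m using Nat.strong_induction_on with
  | _ m ih =>
    intro T hT
    cases m with
    | zero => rw [pvG_zero, pvG_zero]
    | succ n =>
      have hg : (rs.take T).getD (n + 1) 0 = rs.getD (n + 1) 0 := by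
        rw [List.getD_eq_getElem?_getD, List.getD_eq_getElem?_getD, List.getElem?_take_of_lt (by omega)]
      cases h : pvLook rs (rs.getD (n + 1) 0) (n + 1) with
      | none =>
        rw [pvG_succ_none _ _ h, pvG_succ_none]
        rw [hg, pvLook_take rs _ (n + 1) T (by omega), h]
      | some j =>
        have hj : j < n + 1 := pvLook_lt h
        rw [pvG_succ_some _ _ j h, pvG_succ_some (rs.take T) n j
          (by rw [hg, pvLook_take rs _ (n + 1) T (by omega)]; exact h)]
        rw [ih j (by omega) T (by omega), ih n (by omega) T (by omega)]

theorem pvRem_take (k : Int) (l : List Int) : ∀ (j : Nat) (r : Int),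
    pvRem k (l.take j) r = (pvRem k l r).take j := by
  induction l with
  | nil => intro j r; simp [pvRem]
  | cons b bs ih =>
    intro j r
    cases j with
    | zero => simp [pvRem]
    | succ j' => simp [pvRem, ih]

theorem pvRs_take (boxes : List Int) (k : Int) (j : Nat) :
    pvRs (boxes.take j) k = (pvRs boxes k).take (j + 1) := by
  simp [pvRs, pvRem_take]

theorem rs_getD_succ (k : Int) (l : List Int) : ∀ (r : Int) (i : Nat), i < l.length →
    (r :: pvRem k l r).getD (i + 1) 0
      = PySem.Int.mod ((r :: pvRem k l r).getD i 0 + l.getD i 0) k := by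
  induction l with
  | nil => intro r i h; simp at h
  | cons b bs ih =>
    intro r i h
    cases i with
    | zero => simp [pvRem]
    | succ i' =>
      have := ih (PySem.Int.mod (r + b) k) i' (by simpa using h)
      simp only [pvRem, List.getD_cons_succ] at this ⊢
      exact this

theorem getD_last (l : List Int) (h : l ≠ []) :
    PySem.List.pyGetD l (-1) 0 = l.getD (l.length - 1) 0 := by
  rw [PySem.List.pyGetD_neg_one l 0 h, List.getLast_eq_getElem,
    List.getD_eq_getElem?_getD, List.getElem?_eq_getElem (by have := List.length_pos_iff.mpr h; omega : l.length - 1 < l.length)]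
  rfl

-- ===== main lemma for A =====
theorem A_eq_G (k : Int) : ∀ (n : Nat) (boxes : List Int), boxes.length = n →
    solution_by_myself_2 boxes k = pvG (pvRs boxes k) boxes.length := by
  intro n
  induction n using Nat.strong_induction_on with
  | _ n ih =>
    intro boxes hlen
    rw [solution_by_myself_2]
    cases boxes with
    | nil => simp [pvRs, pvRem, pvG_zero]
    | cons b bs =>
      rw [if_neg (by simp)]
      dsimp only
      rw [premain_eq (b :: bs) k (by simp)]
      have hn : bs.length + 1 = n := by simpa using hlen
      have hlen2 : (pvRs (b :: bs) k).length = bs.length + 2 := by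
        rw [pvRs_length]; simp
      have hm : (((pvRs (b :: bs) k).length : Int) - 2) = ((bs.length + 1 : Nat) : Int) - 1 := by
        rw [hlen2]; push_cast; ring
      rw [hm, findLen_eq (pvRs (b :: bs) k) (bs.length + 1)]
      have ht : PySem.List.pyGetD (pvRs (b :: bs) k) (-1) 0
          = (pvRs (b :: bs) k).getD (bs.length + 1) 0 := by
        rw [getD_last _ (by simp [pvRs]), hlen2]
        congr 1
      rw [ht]
      simp only [List.length_cons]
      cases hl : pvLook (pvRs (b :: bs) k) ((pvRs (b :: bs) k).getD (bs.length + 1) 0) (bs.length + 1) with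
      | none =>
        rw [pvG_succ_none _ _ hl]
        norm_num
        simp [pvRs]
      | some j =>
        have hj : j < bs.length + 1 := pvLook_lt hl
        rw [pvG_succ_some _ _ j hl]
        simp only [Option.elim]
        rw [dif_neg (by omega)]
        rw [PySem.List.slice_to_natCast, PySem.List.slice_to_neg_one]
        have hlt : (List.take j (b :: bs)).length = j := by
          simp; omega
        have hld : ((b :: bs).dropLast).length = bs.length := by simp
        rw [ih j (by omega) _ hlt, ih bs.length (by omega) _ hld]
        rw [hlt, hld, List.dropLast_eq_take]
        have hc : (b :: bs).length - 1 = bs.length := by simp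
        rw [hc, pvRs_take, pvRs_take, pvG_take _ j (j + 1) (by omega),
          pvG_take _ bs.length (bs.length + 1) (by omega)]

-- ===== main lemma for B =====
theorem foldB_inv (boxes : List Int) (k : Int) : ∀ (c m : Nat) (d : PySem.Dict Int Int),
    m + c = boxes.length →
    (∀ v, d.get? v = (pvLook (pvRs boxes k) v (m + 1)).map (fun j => ((j : Nat) : Int))) →
    ∃ d', (boxes.drop m).foldl (pvStepB k)
        ((m : Int), (pvRs boxes k).getD m 0, (List.range (m + 1)).map (pvG (pvRs boxes k)), d)
      = ((boxes.length : Int), (pvRs boxes k).getD boxes.length 0,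
          (List.range (boxes.length + 1)).map (pvG (pvRs boxes k)), d') := by
  intro c
  induction c with
  | zero =>
    intro m d hm _
    rw [List.drop_of_length_le (by omega)]
    exact ⟨d, by rw [show m = boxes.length by omega]; rfl⟩
  | succ c ih =>
    intro m d hm hd
    have hmlt : m < boxes.length := by omega
    have hr : PySem.Int.mod ((pvRs boxes k).getD m 0 + boxes[m]) k = (pvRs boxes k).getD (m + 1) 0 := by
      have h1 := rs_getD_succ k boxes 0 m hmlt
      rw [show boxes.getD m 0 = boxes[m] from by
        rw [List.getD_eq_getElem?_getD, List.getElem?_eq_getElem hmlt]; rfl] at h1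
      exact h1.symm
    have hcast : ((m + 1 : Nat) : Int) = (m : Int) + 1 := by push_cast; ring
    have hstep : pvStepB k ((m : Int), (pvRs boxes k).getD m 0,
          (List.range (m + 1)).map (pvG (pvRs boxes k)), d) boxes[m]
        = (((m + 1 : Nat) : Int), (pvRs boxes k).getD (m + 1) 0,
          (List.range (m + 1 + 1)).map (pvG (pvRs boxes k)),
          d.insert ((pvRs boxes k).getD (m + 1) 0) ((m : Int) + 1)) := by
      unfold pvStepB
      dsimp only
      rw [hr, hd, hcast]
      cases hl : pvLook (pvRs boxes k) ((pvRs boxes k).getD (m + 1) 0) (m + 1) with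
      | none =>
        simp only [Option.map_none]
        have hdp : ((List.range (m + 1)).map (pvG (pvRs boxes k))) ++ [(0 : Int)]
            = (List.range (m + 1 + 1)).map (pvG (pvRs boxes k)) := by
          conv_rhs => rw [List.range_succ]
          rw [List.map_append]
          simp [pvG_succ_none _ _ hl]
        rw [hdp]
      | some j =>
        have hj : j < m + 1 := pvLook_lt hl
        simp only [Option.map_some]
        have e1 : PySem.List.pyGetD ((List.range (m + 1)).map (pvG (pvRs boxes k))) ((j : Nat) : Int) 0
            = pvG (pvRs boxes k) j := by
          rw [PySem.List.pyGetD_natCast, PySem.List.getD_map_range _ _ _ _ hj]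
        have e2 : PySem.List.pyGetD ((List.range (m + 1)).map (pvG (pvRs boxes k))) ((m : Int) + 1 - 1) 0
            = pvG (pvRs boxes k) m := by
          rw [show (m : Int) + 1 - 1 = ((m : Nat) : Int) by ring, PySem.List.pyGetD_natCast,
            PySem.List.getD_map_range _ _ _ _ (by omega)]
        rw [e1, e2]
        have hdp : ((List.range (m + 1)).map (pvG (pvRs boxes k)))
              ++ [max (1 + pvG (pvRs boxes k) j) (pvG (pvRs boxes k) m)]
            = (List.range (m + 1 + 1)).map (pvG (pvRs boxes k)) := by
          conv_rhs => rw [List.range_succ]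
          rw [List.map_append]
          simp [(pvG_succ_some _ _ j hl).symm]
        rw [hdp]
    have hd' : ∀ v, (d.insert ((pvRs boxes k).getD (m + 1) 0) ((m : Int) + 1)).get? v
        = (pvLook (pvRs boxes k) v (m + 1 + 1)).map (fun j => ((j : Nat) : Int)) := by
      intro v
      rw [PySem.Dict.get?_insert]
      unfold pvLook
      by_cases hv : v = (pvRs boxes k).getD (m + 1) 0
      · rw [if_pos hv, if_pos hv.symm]
        simp
      · rw [if_neg hv, if_neg (fun hh => hv hh.symm), hd v]
    rw [List.drop_eq_getElem_cons hmlt, List.foldl_cons, hstep]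
    exact ih (m + 1) _ (by omega) hd' 

theorem B_eq_G (boxes : List Int) (k : Int) :
    solution_by_myself_2_alt boxes k = pvG (pvRs boxes k) boxes.length := by
  unfold solution_by_myself_2_alt
  have hd0 : ∀ v, (PySem.Dict.ofList [((0 : Int), (0 : Int))]).get? v
      = (pvLook (pvRs boxes k) v (0 + 1)).map (fun j => ((j : Nat) : Int)) := by
    intro v
    unfold pvLook
    rw [show (pvRs boxes k).getD 0 0 = 0 from rfl]
    show (PySem.Dict.mk [((0 : Int), (0 : Int))]).get? v = _
    rw [PySem.Dict.get?_mk_cons]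
    by_cases hv : (0 : Int) = v
    · simp [hv]
    · rw [if_neg (by simp [hv]), if_neg hv]
      simp [PySem.Dict.get?, pvLook]
  obtain ⟨d', hfold⟩ := foldB_inv boxes k boxes.length 0 (PySem.Dict.ofList [(0, 0)]) (by omega) hd0
  simp only [Nat.cast_zero, List.drop_zero] at hfold
  rw [show (pvRs boxes k).getD 0 0 = (0 : Int) from rfl,
    show (List.range (0 + 1)).map (pvG (pvRs boxes k)) = [(0 : Int)] from by simp [pvG_zero]] at hfold
  show PySem.List.pyGetD ((boxes.foldl (pvStepB k) (0, 0, [0], PySem.Dict.ofList [(0, 0)])).2.2.1) (-1) 0 = _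
  rw [hfold]
  dsimp only
  rw [List.range_succ, List.map_append, List.map_cons, List.map_nil,
    PySem.List.pyGetD_neg_one_append_singleton]

theorem solution_by_myself_2_spec : Claim_equal_solution_by_myself_2 := by
  intro boxes k _ _
  unfold Spec_solution_by_myself_2
  rw [A_eq_G k boxes.length boxes rfl, B_eq_G]
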